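-- pv_equiv track=rewrite | github.com/OpenForecaster/scaling-forecasting-training | data/kalshi/fetcher.py | choose_times
-- ===== SOURCE A (Python) =====
-- from typing import Dict, Any, Iterable, List, Optional
--
-- def choose_times(markets: List[Dict[str, Any]]):
--     # created_date: earliest open_time
--     opens = [m.get("open_time") for m in markets if m.get("open_time")]
--     created_date = min(opens) if opens else None
--     # resolution_date proxy: latest latest_expiration_time / expiration_time / close_time
--     exps = [
--         (m.get("latest_expiration_time") or m.get("expiration_time") or m.get("close_time"))
--         for m in markets
--     ]
--     exps = [t for t in exps if t]
--     resolution_date = max(exps) if exps else None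
--     # scheduled/actual close: we take the last close_time as a rough stand-in (public API has no settled_at)
--     last_close = max((m.get("close_time") for m in markets if m.get("close_time")), default=None)
--     return created_date, resolution_date, last_close
-- ===== SOURCE B (Python) =====
-- from typing import Dict, Any, List
--
--
-- def choose_times(markets: List[Dict[str, Any]]):
--     # Divide-and-conquer: recursively split the market list in half, compute the
--     # (earliest open, latest expiration-proxy, latest close) triple of each half,
--     # and merge the two triples; correct because min/max are associative.
--     def omin(a, b):
--         return b if a is None else a if b is None else min(a, b)
--
--     def omax(a, b):
--         return b if a is None else a if b is None else max(a, b)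
--
--     def go(ms):
--         if len(ms) == 1:
--             m = ms[0]
--             ot = m.get("open_time")
--             ex = m.get("latest_expiration_time") or m.get("expiration_time") or m.get("close_time")
--             ct = m.get("close_time")
--             return (ot if ot else None, ex if ex else None, ct if ct else None)
--         mid = len(ms) // 2
--         l = go(ms[:mid])
--         r = go(ms[mid:])
--         return (omin(l[0], r[0]), omax(l[1], r[1]), omax(l[2], r[2]))
--
--     if not markets:
--         return (None, None, None)
--     return go(markets)
-- ===== Notes on version B (the rewrite author's own statement) =====
-- stated objective: alternative
-- what changed: Replaces A's three staged comprehension-then-min/max passes by a divide-and-conquer recursion that splits the market list in half, computes each half's (earliest open, latest expiration proxy, latest close) triple, and merges the triples with option-aware min/max, relying on associativity of min/max.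
import Mathlib
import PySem

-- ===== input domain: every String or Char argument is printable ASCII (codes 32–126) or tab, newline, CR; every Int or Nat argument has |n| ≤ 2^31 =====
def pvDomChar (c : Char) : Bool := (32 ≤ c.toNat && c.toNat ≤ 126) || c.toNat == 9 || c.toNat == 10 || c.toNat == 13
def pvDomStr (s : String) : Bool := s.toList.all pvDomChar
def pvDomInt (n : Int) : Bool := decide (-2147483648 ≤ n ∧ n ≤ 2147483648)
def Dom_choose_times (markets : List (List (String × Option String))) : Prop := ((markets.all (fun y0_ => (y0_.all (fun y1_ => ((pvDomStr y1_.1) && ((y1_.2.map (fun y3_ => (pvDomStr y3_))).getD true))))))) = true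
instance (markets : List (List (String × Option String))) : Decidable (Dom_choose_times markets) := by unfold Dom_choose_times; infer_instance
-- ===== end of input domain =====

-- B replaces A's three staged comprehension-plus-min/max passes by a divide-and-conquer
-- recursion on halves of the list merging per-half triples (objective: alternative).

-- shared helpers: Python's m.get(k) (missing key and value None both give None) and truthiness of str/None
def pvGet (m : List (String × Option String)) (k : String) : Option String :=
  ((PySem.Dict.mk m).get? k).join

def pvTruthy : Option String → Bool
  | some s => s ≠ ""
  | none => false

-- Python's 'a or b': first operand if truthy, else second
def pvOr (a b : Option String) : Option String := if pvTruthy a then a else b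

-- ===== PORT A =====
def choose_times (markets : List (List (String × Option String))) : Option String × Option String × Option String :=
  let opens := markets.filterMap (fun m => let v := pvGet m "open_time"; if pvTruthy v then v else none)
  let created_date := PySem.List.min? opens (fun y => y)
  let exps := markets.map (fun m =>
    pvOr (pvOr (pvGet m "latest_expiration_time") (pvGet m "expiration_time")) (pvGet m "close_time"))
  let exps2 := exps.filterMap (fun t => if pvTruthy t then t else none)
  let resolution_date := PySem.List.max? exps2 (fun y => y)
  let last_close := PySem.List.max?
    (markets.filterMap (fun m => let v := pvGet m "close_time"; if pvTruthy v then v else none)) (fun y => y)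
  (created_date, resolution_date, last_close)

-- ===== PORT B =====
-- 'b if a is None else a if b is None else min(a, b)' (Python min/max return the first on ties)
def omin (a b : Option String) : Option String :=
  match a, b with
  | none, b => b
  | a, none => a
  | some x, some y => some (min x y)

def omax (a b : Option String) : Option String :=
  match a, b with
  | none, b => b
  | a, none => a
  | some x, some y => some (max x y)

-- the triple of a single market ('v if v else None' for each of the three reads)
def leafB (m : List (String × Option String)) : Option String × Option String × Option String :=
  let ot := pvGet m "open_time"
  let ex := pvOr (pvOr (pvGet m "latest_expiration_time") (pvGet m "expiration_time")) (pvGet m "close_time")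
  let ct := pvGet m "close_time"
  ((if pvTruthy ot then ot else none), (if pvTruthy ex then ex else none), (if pvTruthy ct then ct else none))

-- 'go': split in half, recurse, merge ([]-case is a totality guard; go is never called on [])
def goB : List (List (String × Option String)) → Option String × Option String × Option String
  | [] => (none, none, none)
  | [m] => leafB m
  | ms@(_ :: _ :: _) =>
      let mid := ms.length / 2
      let l := goB (ms.take mid)
      let r := goB (ms.drop mid)
      (omin l.1 r.1, omax l.2.1 r.2.1, omax l.2.2 r.2.2)
termination_by ms => ms.length
decreasing_by
  all_goals subst_vars
  · simp [List.length_take]; omega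
  · simp [List.length_drop]; omega

def choose_times_alt (markets : List (List (String × Option String))) : Option String × Option String × Option String :=
  if markets.isEmpty then (none, none, none) else goB markets

-- ===== PRECONDITION & SPEC =====
def Spec_choose_times (markets : List (List (String × Option String))) (out : Option String × Option String × Option String) : Prop := out = choose_times_alt markets
instance (markets : List (List (String × Option String))) (out : Option String × Option String × Option String) : Decidable (Spec_choose_times markets out) := by unfold Spec_choose_times; infer_instance

-- ===== CLAIM =====
def Claim_equal_choose_times : Prop := ∀ (markets : List (List (String × Option String))), Dom_choose_times markets → Spec_choose_times markets (choose_times markets)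

-- ===== LEMMAS AND PROOFS =====

lemma foldl_min_min (u : List String) (a y : String) :
    u.foldl min (min a y) = min a (u.foldl min y) := by
  induction u generalizing y with
  | nil => rfl
  | cons c u ih => rw [List.foldl_cons, min_assoc, ih, List.foldl_cons]

lemma foldl_max_max (u : List String) (a y : String) :
    u.foldl max (max a y) = max a (u.foldl max y) := by
  induction u generalizing y with
  | nil => rfl
  | cons c u ih => rw [List.foldl_cons, max_assoc, ih, List.foldl_cons]

lemma min?_append (xs ys : List String) :
    PySem.List.min? (xs ++ ys) (fun y => y) =
      omin (PySem.List.min? xs (fun y => y)) (PySem.List.min? ys (fun y => y)) := by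
  cases xs with
  | nil => cases ys <;> rfl
  | cons x t =>
    cases ys with
    | nil => rw [List.append_nil, PySem.List.min?_id_cons]; rfl
    | cons y u =>
      simp [List.cons_append, PySem.List.min?_id_cons, omin, List.foldl_append,
        List.foldl_cons, foldl_min_min]

lemma max?_append (xs ys : List String) :
    PySem.List.max? (xs ++ ys) (fun y => y) =
      omax (PySem.List.max? xs (fun y => y)) (PySem.List.max? ys (fun y => y)) := by
  cases xs with
  | nil => cases ys <;> rfl
  | cons x t =>
    cases ys with
    | nil => rw [List.append_nil, PySem.List.max?_id_cons]; rfl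
    | cons y u =>
      simp [List.cons_append, PySem.List.max?_id_cons, omax, List.foldl_append,
        List.foldl_cons, foldl_max_max]

-- A's result, as a function we can relate both ports to
def fOpen (m : List (String × Option String)) : Option String :=
  let v := pvGet m "open_time"; if pvTruthy v then v else none
def fExp (m : List (String × Option String)) : Option String :=
  let v := pvOr (pvOr (pvGet m "latest_expiration_time") (pvGet m "expiration_time")) (pvGet m "close_time")
  if pvTruthy v then v else none
def fClose (m : List (String × Option String)) : Option String :=
  let v := pvGet m "close_time"; if pvTruthy v then v else none

def Fspec (ms : List (List (String × Option String))) : Option String × Option String × Option String :=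
  (PySem.List.min? (ms.filterMap fOpen) (fun y => y),
   PySem.List.max? (ms.filterMap fExp) (fun y => y),
   PySem.List.max? (ms.filterMap fClose) (fun y => y))

lemma Fspec_append (l r : List (List (String × Option String))) :
    Fspec (l ++ r) =
      (omin (Fspec l).1 (Fspec r).1, omax (Fspec l).2.1 (Fspec r).2.1, omax (Fspec l).2.2 (Fspec r).2.2) := by
  simp [Fspec, List.filterMap_append, min?_append, max?_append]

lemma min?_filterMap_single {α : Type} (f : α → Option String) (m : α) :
    PySem.List.min? (List.filterMap f [m]) (fun y => y) = f m := by
  cases h : f m <;> simp [List.filterMap, h, PySem.List.min?_id_cons]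

lemma max?_filterMap_single {α : Type} (f : α → Option String) (m : α) :
    PySem.List.max? (List.filterMap f [m]) (fun y => y) = f m := by
  cases h : f m <;> simp [List.filterMap, h, PySem.List.max?_id_cons]

lemma leafB_eq (m : List (String × Option String)) : leafB m = Fspec [m] := by
  show (fOpen m, fExp m, fClose m) = Fspec [m]
  simp [Fspec, min?_filterMap_single, max?_filterMap_single]

theorem goB_eq : ∀ ms : List (List (String × Option String)), goB ms = Fspec ms
  | [] => by rw [goB]; rfl
  | [m] => by rw [goB, leafB_eq]
  | m1 :: m2 :: rest => by
    rw [goB]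
    have h1 := goB_eq ((m1 :: m2 :: rest).take ((m1 :: m2 :: rest).length / 2))
    have h2 := goB_eq ((m1 :: m2 :: rest).drop ((m1 :: m2 :: rest).length / 2))
    simp only [h1, h2, ← Fspec_append, List.take_append_drop]
termination_by ms => ms.length
decreasing_by
  · simp [List.length_take]; omega
  · simp [List.length_drop]; omega

lemma choose_times_eq_Fspec (ms : List (List (String × Option String))) :
    choose_times ms = Fspec ms := by
  simp [choose_times, Fspec, fOpen, fExp, fClose, List.filterMap_map]

-- ===== VERDICT =====
theorem choose_times_spec : Claim_equal_choose_times := by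
  intro markets _
  show choose_times markets = choose_times_alt markets
  rw [choose_times_eq_Fspec, choose_times_alt]
  split
  · next h => simp [List.isEmpty_iff] at h; subst h; rfl
  · rw [goB_eq]
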